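-- pv_equiv track=rewrite | github.com/Adam-Calleja/Polaris | src/polaris_rag/cli/evaluate_rag.py | _prepared_rows_reranker_fingerprint
-- ===== SOURCE A (Python) =====
-- from typing import Any, Iterator, Mapping
--
-- def _prepared_rows_reranker_fingerprint(rows: list[dict[str, Any]]) -> tuple[str | None, int]:
--     """Prepared Rows Reranker Fingerprint.
--
--     Parameters
--     ----------
--     rows : list[dict[str, Any]]
--         Value for rows.
--
--     Returns
--     -------
--     tuple[str or None, int]
--         Collected results from the operation.
--
--     Raises
--     ------
--     ValueError
--         If the provided value is invalid for the operation.
--     """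
--     fingerprints: set[str] = set()
--     missing = 0
--     for row in rows:
--         metadata = _row_metadata(row)
--         value = metadata.get("reranker_fingerprint")
--         text = str(value or "").strip()
--         if text:
--             fingerprints.add(text)
--         else:
--             missing += 1
--
--     if not fingerprints:
--         return None, missing
--     if len(fingerprints) != 1:
--         raise ValueError(
--             "Prepared rows contain multiple reranker fingerprints. Regenerate prepared rows "
--             "before running this evaluation."
--         )
--     return next(iter(fingerprints)), missing
--
-- def _row_metadata(row: Mapping[str, Any]) -> Mapping[str, Any]:
--     """Row Metadata.
--
--     Parameters
--     ----------
--     row : Mapping[str, Any]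
--         Value for row.
--
--     Returns
--     -------
--     Mapping[str, Any]
--         Result of the operation.
--     """
--     metadata = row.get("metadata")
--     return metadata if isinstance(metadata, Mapping) else {}
-- ===== SOURCE B (Python) =====
-- from typing import Any, Mapping
--
-- def _prepared_rows_reranker_fingerprint(rows: list[dict[str, Any]]) -> tuple[str | None, int]:
--     fingerprint: str | None = None
--     missing = 0
--     for row in rows:
--         metadata = row.get("metadata")
--         if not isinstance(metadata, Mapping):
--             metadata = {}
--         text = str(metadata.get("reranker_fingerprint") or "").strip()
--         if not text:
--             missing += 1
--         elif fingerprint is None: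
--             fingerprint = text
--         elif text != fingerprint:
--             raise ValueError(
--                 "Prepared rows contain multiple reranker fingerprints. Regenerate prepared rows "
--                 "before running this evaluation."
--             )
--     return fingerprint, missing
-- ===== Notes on version B (the rewrite author's own statement) =====
-- stated objective: simpler
-- what changed: Replaces A's accumulating set plus post-loop emptiness/size checks with a single scalar holding the first non-blank fingerprint and an in-loop mismatch check that raises the identical ValueError immediately.
import Mathlib
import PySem

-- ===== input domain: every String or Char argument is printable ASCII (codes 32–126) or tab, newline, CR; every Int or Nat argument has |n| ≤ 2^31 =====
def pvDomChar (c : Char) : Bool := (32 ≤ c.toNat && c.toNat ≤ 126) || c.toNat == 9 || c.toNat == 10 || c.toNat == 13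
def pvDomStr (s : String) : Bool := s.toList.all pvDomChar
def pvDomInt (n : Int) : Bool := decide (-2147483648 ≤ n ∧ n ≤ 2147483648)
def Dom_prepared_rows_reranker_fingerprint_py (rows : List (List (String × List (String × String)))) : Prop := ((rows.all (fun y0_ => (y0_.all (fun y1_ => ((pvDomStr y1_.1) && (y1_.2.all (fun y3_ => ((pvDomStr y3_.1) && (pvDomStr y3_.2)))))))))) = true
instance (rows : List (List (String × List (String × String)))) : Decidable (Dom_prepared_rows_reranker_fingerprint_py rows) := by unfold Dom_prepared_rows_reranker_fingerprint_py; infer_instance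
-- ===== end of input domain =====

-- B replaces A's accumulating set + post-loop size check with a single scalar
-- "first fingerprint seen" variable and an in-loop mismatch check (objective: simpler).
-- Pre_ excludes inputs with two distinct non-blank fingerprints, where both
-- programs raise ValueError.

-- shared helper: port of _row_metadata (the value, when present, is always a Mapping here)
def pvRowMeta (row : List (String × List (String × String))) : List (String × String) :=
  (PySem.Dict.get? ⟨row⟩ "metadata").getD []

-- text of one row: str(metadata.get("reranker_fingerprint") or "").strip()
def pvRowText (row : List (String × List (String × String))) : String :=
  PySem.Str.strip ((PySem.Dict.get? ⟨pvRowMeta row⟩ "reranker_fingerprint").getD "")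

-- ===== PORT A =====
def prepared_rows_reranker_fingerprint_py (rows : List (List (String × List (String × String)))) : Option String × Int :=
  let st := rows.foldl (fun (st : PySem.Set String × Int) row =>
    let text := pvRowText row
    if text ≠ "" then (PySem.Set.add st.1 text, st.2) else (st.1, st.2 + 1)) ([], 0)
  let fingerprints := st.1
  let missing := st.2
  if fingerprints = [] then (none, missing)
  else if PySem.Set.len fingerprints ≠ 1 then
    (none, missing)  -- raise ValueError("Prepared rows contain multiple reranker fingerprints. …") — excluded by Pre_
  else (fingerprints.head?, missing)  -- next(iter(fingerprints)): the singleton element, order-independent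

-- ===== PORT B =====
def prepared_rows_reranker_fingerprint_py_alt (rows : List (List (String × List (String × String)))) : Option String × Int :=
  rows.foldl (fun (st : Option String × Int) row =>
    let text := pvRowText row
    if text = "" then (st.1, st.2 + 1)
    else match st.1 with
      | none => (some text, st.2)
      | some fp =>
        if text ≠ fp then
          (some fp, st.2)  -- raise ValueError(same message) — excluded by Pre_
        else (some fp, st.2)) (none, 0)

-- ===== PRECONDITION & SPEC =====
-- Pre_ excludes exactly the inputs where A (and B) raise ValueError: rows whose
-- non-blank reranker fingerprints are not all identical.
def Pre_prepared_rows_reranker_fingerprint_py (rows : List (List (String × List (String × String)))) : Prop :=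
  ((rows.map pvRowText).filter (fun t => t ≠ "")).Pairwise (· = ·)
instance (rows : List (List (String × List (String × String)))) : Decidable (Pre_prepared_rows_reranker_fingerprint_py rows) := by unfold Pre_prepared_rows_reranker_fingerprint_py; infer_instance

def pvWitness_prepared_rows_reranker_fingerprint_py : (List (List (String × List (String × String)))) :=
  ([[("metadata", [("reranker_fingerprint", " fp1 ")])],
    [("metadata", [("reranker_fingerprint", "fp1")])],
    [("metadata", [])],
    []])

def Spec_prepared_rows_reranker_fingerprint_py (rows : List (List (String × List (String × String)))) (out : Option String × Int) : Prop := out = prepared_rows_reranker_fingerprint_py_alt rows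
instance (rows : List (List (String × List (String × String)))) (out : Option String × Int) : Decidable (Spec_prepared_rows_reranker_fingerprint_py rows out) := by unfold Spec_prepared_rows_reranker_fingerprint_py; infer_instance

-- ===== CLAIM (what is proved, stated in full; the proofs are below) =====
def Claim_equal_prepared_rows_reranker_fingerprint_py : Prop := ∀ (rows : List (List (String × List (String × String)))), Dom_prepared_rows_reranker_fingerprint_py rows → Pre_prepared_rows_reranker_fingerprint_py rows → Spec_prepared_rows_reranker_fingerprint_py rows (prepared_rows_reranker_fingerprint_py rows)

-- ===== LEMMAS AND PROOFS =====

-- the non-blank texts and the blank count, as functions of the input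
def pvNB (rows : List (List (String × List (String × String)))) : List String :=
  (rows.map pvRowText).filter (fun t => t ≠ "")
def pvBlanks (rows : List (List (String × List (String × String)))) : Int :=
  ((rows.map pvRowText).filter (fun t => t = "")).length

theorem pvA_fold (rows : List (List (String × List (String × String)))) :
    ∀ (s : PySem.Set String) (m : Int),
      rows.foldl (fun (st : PySem.Set String × Int) row =>
        let text := pvRowText row
        if text ≠ "" then (PySem.Set.add st.1 text, st.2) else (st.1, st.2 + 1)) (s, m)
      = (PySem.Set.update s (pvNB rows), m + pvBlanks rows) := by
  induction rows with
  | nil => intro s m; simp [pvNB, pvBlanks, PySem.Set.update]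
  | cons r rs ih =>
    intro s m
    simp only [ne_eq, ite_not] at ih ⊢
    by_cases h : pvRowText r = ""
    · simp [List.foldl_cons, h, ih, pvNB, pvBlanks]
      ring
    · simp [List.foldl_cons, h, ih, pvNB, pvBlanks, PySem.Set.update]

theorem pvB_fold (rows : List (List (String × List (String × String)))) :
    ∀ (o : Option String) (m : Int),
      rows.foldl (fun (st : Option String × Int) row =>
        let text := pvRowText row
        if text = "" then (st.1, st.2 + 1)
        else match st.1 with
          | none => (some text, st.2)
          | some fp =>
            if text ≠ fp then (some fp, st.2) else (some fp, st.2)) (o, m)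
      = (o.or (pvNB rows).head?, m + pvBlanks rows) := by
  induction rows with
  | nil => intro o m; simp [pvNB, pvBlanks]
  | cons r rs ih =>
    intro o m
    by_cases h : pvRowText r = ""
    · simp only [List.foldl_cons, if_pos h, ih]
      simp [pvNB, pvBlanks, h]
      omega
    · simp only [List.foldl_cons, if_neg h]
      cases o with
      | none =>
        simp only [ih]
        simp [pvNB, pvBlanks, h]
      | some fp =>
        simp only [ih]
        simp [pvNB, pvBlanks, h]

theorem pvSet_update_const (h : String) :
    ∀ (t : List String), (∀ x ∈ t, h = x) → PySem.Set.update [h] t = [h] := by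
  intro t
  induction t with
  | nil => intro _; rfl
  | cons x xs ih =>
    intro hall
    have hx : h = x := hall x (by simp)
    have : PySem.Set.add [h] x = [h] := by
      subst hx
      simp [PySem.Set.add, PySem.Set.contains]
    simpa [PySem.Set.update, this] using ih (fun y hy => hall y (by simp [hy]))

-- ===== VERDICT (by name: the statement is the Claim_ definition above) =====
theorem prepared_rows_reranker_fingerprint_py_spec : Claim_equal_prepared_rows_reranker_fingerprint_py := by
  intro rows _ hpre
  unfold Spec_prepared_rows_reranker_fingerprint_py
  unfold prepared_rows_reranker_fingerprint_py prepared_rows_reranker_fingerprint_py_alt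
  rw [pvA_fold, pvB_fold]
  have hpre' : (pvNB rows).Pairwise (· = ·) := hpre
  cases hnb : pvNB rows with
  | nil => simp [PySem.Set.update]
  | cons h t =>
    rw [hnb] at hpre'
    have hall : ∀ x ∈ t, h = x := (List.pairwise_cons.mp hpre').1
    have hupd : PySem.Set.update [] (h :: t) = [h] := by
      have : PySem.Set.add ([] : PySem.Set String) h = [h] := rfl
      simpa [PySem.Set.update, this] using pvSet_update_const h t hall
    simp [hupd, PySem.Set.len]
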